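-- pv_equiv track=rewrite | github.com/RiffLord/esercizi-python | char-freq/program01.py | sort_chars_by_pos
-- ===== SOURCE A (Python) =====
-- def	sort_chars_by_pos(strings: list, str_len: int) -> list:
-- 	sorted_chars = []
-- 	i = 0
-- 	while i < str_len:
-- 		temp_str = ''
-- 		for s in strings:
-- 			if i < len(s):
-- 				temp_str += s[i]
-- 		sorted_chars.append(temp_str)
-- 		i += 1
-- 	return sorted_chars
-- 	pass
-- ===== SOURCE B (Python) =====
-- def sort_chars_by_pos(strings: list, str_len: int) -> list:
--     n = max(str_len, 0)
--     cols = [''] * n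
--     for s in strings:
--         for i in range(min(len(s), n)):
--             cols[i] += s[i]
--     return cols
-- ===== Notes on version B (the rewrite author's own statement) =====
-- stated objective: faster
-- what changed: B inverts the loop nesting: instead of A's column-major scan that rebuilds each column string by re-traversing every input string per position, B pre-allocates str_len empty column accumulators and makes a single row-major pass over the strings, appending each character s[i] into cols[i].
import Mathlib
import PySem

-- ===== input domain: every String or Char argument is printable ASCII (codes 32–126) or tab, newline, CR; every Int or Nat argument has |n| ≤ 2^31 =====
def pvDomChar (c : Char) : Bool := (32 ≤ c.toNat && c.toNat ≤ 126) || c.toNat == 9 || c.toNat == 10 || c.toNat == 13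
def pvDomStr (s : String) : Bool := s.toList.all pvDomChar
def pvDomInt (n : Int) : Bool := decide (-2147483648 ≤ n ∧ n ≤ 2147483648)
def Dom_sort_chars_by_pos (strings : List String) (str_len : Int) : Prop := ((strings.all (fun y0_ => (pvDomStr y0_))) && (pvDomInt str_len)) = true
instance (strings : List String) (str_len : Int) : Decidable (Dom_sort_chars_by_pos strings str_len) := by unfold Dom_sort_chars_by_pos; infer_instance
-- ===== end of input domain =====

-- Header: B replaces A's column-major rescans (one pass over all strings per position)
-- by a single row-major pass maintaining all str_len column accumulators at once.

-- ===== PORT A =====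
-- inner 'for s in strings' loop of A: build the column string for position i
def pvAcol (strings : List String) (i : Int) : List Char :=
  strings.foldl (fun temp s =>
    if i < PySem.Str.len s then
      match PySem.Str.pyGet? s i with
      | some c => temp ++ [c]
      | none => temp
    else temp) []

-- the 'while i < str_len' loop of A, appending one column per iteration
def pvAwhile (strings : List String) (str_len i : Int) : List String :=
  if _h : i < str_len then
    String.ofList (pvAcol strings i) :: pvAwhile strings str_len (i + 1)
  else []
termination_by (str_len - i).toNat
decreasing_by omega

def sort_chars_by_pos (strings : List String) (str_len : Int) : List String :=
  pvAwhile strings str_len 0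

-- ===== PORT B =====
-- B's inner loop: 'for i in range(min(len(s), n)): cols[i] += s[i]'
def pvBupd : List (List Char) → List Char → List (List Char)
  | cols, [] => cols
  | [], _ :: _ => []
  | col :: cols, c :: cs => (col ++ [c]) :: pvBupd cols cs

def sort_chars_by_pos_alt (strings : List String) (str_len : Int) : List String :=
  (strings.foldl (fun cols s => pvBupd cols s.toList)
      (List.replicate (max str_len 0).toNat [])).map String.ofList

-- ===== PRECONDITION & SPEC =====
def Spec_sort_chars_by_pos (strings : List String) (str_len : Int) (out : List String) : Prop := out = sort_chars_by_pos_alt strings str_len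
instance (strings : List String) (str_len : Int) (out : List String) : Decidable (Spec_sort_chars_by_pos strings str_len out) := by unfold Spec_sort_chars_by_pos; infer_instance

-- ===== CLAIM (what is proved, stated in full; the proofs are below) =====
def Claim_equal_sort_chars_by_pos : Prop := ∀ (strings : List String) (str_len : Int), Dom_sort_chars_by_pos strings str_len → Spec_sort_chars_by_pos strings str_len (sort_chars_by_pos strings str_len)

-- ===== LEMMAS AND PROOFS =====

-- the characters found at position j across the strings (proof-only characterisation)
def pvColChars : List String → Nat → List Char
  | [], _ => []
  | s :: rest, j => (s.toList[j]?).toList ++ pvColChars rest j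

theorem pvAcol_go (strings : List String) (j : Nat) (acc : List Char) :
    strings.foldl (fun temp s =>
      if (j : Int) < PySem.Str.len s then
        match PySem.Str.pyGet? s (j : Int) with
        | some c => temp ++ [c]
        | none => temp
      else temp) acc = acc ++ pvColChars strings j := by
  induction strings generalizing acc with
  | nil => simp [pvColChars]
  | cons s rest ih =>
    simp only [List.foldl_cons, pvColChars]
    by_cases h : j < s.toList.length
    · have hlt : (j : Int) < PySem.Str.len s := by
        simp [PySem.Str.len_eq]; exact_mod_cast h
      have hget : PySem.Str.pyGet? s (j : Int) = some s.toList[j] := by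
        simp [List.getElem?_eq_getElem h]
      rw [if_pos hlt, hget, ih]
      simp [List.getElem?_eq_getElem h]
    · have hlt : ¬ (j : Int) < PySem.Str.len s := by
        simp [PySem.Str.len_eq]; exact_mod_cast Nat.not_lt.mp h
      rw [if_neg hlt, ih]
      simp [List.getElem?_eq_none_iff.mpr (Nat.not_lt.mp h)]

theorem pvAcol_eq (strings : List String) (j : Nat) :
    pvAcol strings (j : Int) = pvColChars strings j := by
  rw [pvAcol, pvAcol_go]; simp

theorem pvAwhile_eq (strings : List String) (str_len i : Int) :
    pvAwhile strings str_len i =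
      (List.range (str_len - i).toNat).map
        (fun (k : Nat) => String.ofList (pvAcol strings (i + (k : Int)))) := by
  by_cases h : i < str_len
  · rw [pvAwhile, dif_pos h, pvAwhile_eq strings str_len (i + 1)]
    have hm : (str_len - i).toNat = (str_len - (i + 1)).toNat + 1 := by omega
    rw [hm, List.range_succ_eq_map, List.map_cons, List.map_map]
    congr 1
    · norm_num
    · apply List.map_congr_left
      intro a _
      simp only [Function.comp_apply]
      congr 2
      push_cast
      ring
  · rw [pvAwhile, dif_neg h]
    have hm : (str_len - i).toNat = 0 := by omega
    rw [hm]
    simp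
termination_by (str_len - i).toNat
decreasing_by omega

theorem pvBupd_length (cs : List Char) (cols : List (List Char)) :
    (pvBupd cols cs).length = cols.length := by
  induction cs generalizing cols with
  | nil => simp [pvBupd]
  | cons c cs ih =>
    cases cols with
    | nil => simp [pvBupd]
    | cons col cols => simp [pvBupd, ih]

theorem pvBupd_getElem? (cs : List Char) (cols : List (List Char)) (j : Nat) :
    (pvBupd cols cs)[j]? = cols[j]?.map (fun col => col ++ (cs[j]?).toList) := by
  induction cs generalizing cols j with
  | nil =>
    simp only [pvBupd]
    cases cols[j]? <;> simp
  | cons c cs ih =>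
    cases cols with
    | nil => simp [pvBupd]
    | cons col cols =>
      cases j with
      | zero => simp [pvBupd]
      | succ j => simp [pvBupd, ih]

theorem pvFoldl_getElem? (strings : List String) (cols : List (List Char)) (j : Nat) :
    (strings.foldl (fun cols s => pvBupd cols s.toList) cols)[j]? =
      cols[j]?.map (fun col => col ++ pvColChars strings j) := by
  induction strings generalizing cols with
  | nil =>
    simp only [List.foldl_nil, pvColChars]
    cases cols[j]? <;> simp
  | cons s rest ih =>
    simp only [List.foldl_cons, ih, pvBupd_getElem?, pvColChars]
    cases cols[j]? <;> simp

theorem pvFoldl_length (strings : List String) (cols : List (List Char)) :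
    (strings.foldl (fun cols s => pvBupd cols s.toList) cols).length = cols.length := by
  induction strings generalizing cols with
  | nil => rfl
  | cons s rest ih => simp [ih, pvBupd_length]

-- ===== VERDICT (by name: the statement is the Claim_ definition above) =====
theorem sort_chars_by_pos_spec : Claim_equal_sort_chars_by_pos := by
  intro strings str_len _hdom
  unfold Spec_sort_chars_by_pos sort_chars_by_pos sort_chars_by_pos_alt
  rw [pvAwhile_eq]
  set n : Nat := (max str_len 0).toNat with hn
  have hsub : (str_len - 0).toNat = n := by omega
  rw [hsub]
  apply List.ext_getElem
  · simp [pvFoldl_length]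
  · intro j h1 h2
    have hj : j < n := by simpa using h1
    have hlen : j < (strings.foldl (fun cols s => pvBupd cols s.toList)
        (List.replicate n ([] : List Char))).length := by
      simpa [pvFoldl_length] using hj
    have hfold : (strings.foldl (fun cols s => pvBupd cols s.toList)
        (List.replicate n ([] : List Char)))[j] = pvColChars strings j := by
      have h := pvFoldl_getElem? strings (List.replicate n ([] : List Char)) j
      rw [List.getElem?_eq_getElem hlen, List.getElem?_replicate] at h
      simp only [hj, if_pos] at h
      simpa using h
    simp only [List.getElem_map, List.getElem_range, zero_add]
    rw [hfold, pvAcol_eq]
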